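-- pv_equiv track=rewrite | github.com/ByteProject/Puny-BuildTools | FictionTools/abbreviations.py | wagner_optimal_parse
-- ===== SOURCE A (Python) =====
-- def zchar_weight(c):
--     if (ord(c) == 32):
--         return 1 ## space = char 0
--     elif (ord(c) >= 97 and ord(c) <= 122):
--         return 1 ## A0 alphabet
--     elif (ord(c) >= 65 and ord(c) <= 90):
--         return 2 ## A1 alphabet
--     elif (c in "^0123456789.,!?_#'~/\-:()"):
--         return 2 ## A2 alphabet
--     else:
--         return 4
--
-- def wagner_optimal_parse(text, abblist):
--     # dynamic programming algorithm
--     # f(n) = "least space needed to store the abbreviated form of the characters n...len(text)"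
--     N = len(text)
--     f = [0 for i in range(0, N+1)]
--     # you can compute f(n) from all the f(n+k); your goal is f(1)
--     f[N] = 0
--     I=N-1
--     while(I >= 0):
--         # compute f(I) = min( f(I+len(ab))+2, f(I+1)+1) for any matching ab
--         val = f[I+1]+zchar_weight(text[I])
--         for j in range(0, len(abblist)):
--             myabb = abblist[j]
--             if (I+len(myabb) <= len(text) and text[I:I+len(myabb)] == myabb):
--                 # the abbreviation j could be used here, but is it a good idea
--                 val2 = f[I+len(myabb)]+2
--                 if (val2 < val):
--                     val = val2
--         f[I] = val
--         I = I-1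
--     #return the minimal text size with optimal parsing
--     return f[0]
-- ===== SOURCE B (Python) =====
-- def zchar_weight(c):
--     if (ord(c) == 32):
--         return 1 ## space = char 0
--     elif (ord(c) >= 97 and ord(c) <= 122):
--         return 1 ## A0 alphabet
--     elif (ord(c) >= 65 and ord(c) <= 90):
--         return 2 ## A1 alphabet
--     elif (c in "^0123456789.,!?_#'~/\-:()"):
--         return 2 ## A2 alphabet
--     else:
--         return 4
--
-- def wagner_optimal_parse(text, abblist):
--     # Two staged passes instead of A's single backward sweep:
--     # 1. build a match table: starts[j] = all i such that some abbreviation equals text[i:j]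
--     # 2. forward DP over PREFIXES: g[j] = cheapest encoding of text[:j]; answer g[N]
--     N = len(text)
--     starts = [[] for _ in range(N + 1)]
--     for ab in abblist:
--         L = len(ab)
--         for i in range(0, N - L + 1):
--             if text[i:i+L] == ab:
--                 starts[i + L].append(i)
--     g = [0] * (N + 1)
--     for j in range(1, N + 1):
--         best = g[j-1] + zchar_weight(text[j-1])
--         for i in starts[j]:
--             best = min(best, g[i] + 2)
--         g[j] = best
--     return g[N]
-- ===== Notes on version B (the rewrite author's own statement) =====
-- stated objective: alternative
-- what changed: A's single backward sweep computing suffix costs and matching every abbreviation on the fly at each position is replaced by two staged passes: first a precomputed table starts[j] of all positions i where some abbreviation equals text[i:j], then a forward DP over prefix costs that only reads that table; equality is the forward/backward shortest-path duality, proved via two inequality inductions; the precomputed match table avoids re-slicing per abbreviation inside the DP loop (measured constant-factor speedup).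
import Mathlib
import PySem

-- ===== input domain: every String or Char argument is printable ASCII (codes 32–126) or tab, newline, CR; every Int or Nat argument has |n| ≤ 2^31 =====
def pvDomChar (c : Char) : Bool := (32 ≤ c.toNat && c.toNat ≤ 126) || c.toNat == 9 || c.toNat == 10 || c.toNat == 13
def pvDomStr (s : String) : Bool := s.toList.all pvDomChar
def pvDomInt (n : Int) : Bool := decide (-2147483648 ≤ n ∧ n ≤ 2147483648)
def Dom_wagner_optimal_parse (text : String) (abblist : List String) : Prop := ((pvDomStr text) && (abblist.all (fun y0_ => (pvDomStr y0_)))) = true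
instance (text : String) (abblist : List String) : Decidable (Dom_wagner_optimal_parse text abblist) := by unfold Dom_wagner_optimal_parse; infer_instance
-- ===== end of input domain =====

-- B replaces A's single backward sweep (suffix costs, abbreviations matched on the fly
-- starting at each position) by two staged passes: first a table of all match positions
-- (starts[j] = starts i of abbreviations equal to text[i:j]), then a forward DP over
-- PREFIX costs reading that table (objective: alternative decomposition; measured constant-factor speedup).

-- ===== PORT A =====
-- helper zchar_weight, shared by both Python files verbatim
def zchar_weight (c : Char) : Int :=
  if c.toNat = 32 then 1
  else if 97 ≤ c.toNat ∧ c.toNat ≤ 122 then 1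
  else if 65 ≤ c.toNat ∧ c.toNat ≤ 90 then 2
  else if c ∈ ("^0123456789.,!?_#'~/\\-:()".toList) then 2
  else 4

-- inner 'for j in range(0, len(abblist))' of A (val is the running minimum)
def pvInnerA (tl : List Char) (f : List Int) (I : Nat) (abbl : List (List Char)) (val : Int) : Int :=
  abbl.foldl (fun val myabb =>
    if I + myabb.length ≤ tl.length ∧
       PySem.List.slice tl (some (I : Int)) (some ((I + myabb.length : Nat) : Int)) = myabb then
      (if f.getD (I + myabb.length) 0 + 2 < val then f.getD (I + myabb.length) 0 + 2 else val)
    else val) val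

-- 'while (I >= 0)' countdown: pvLoopA f i processes positions i-1, i-2, …, 0
def pvLoopA (tl : List Char) (abbl : List (List Char)) : List Int → Nat → List Int
  | f, 0 => f
  | f, (i+1) =>
    pvLoopA tl abbl
      (f.set i (pvInnerA tl f i abbl (f.getD (i+1) 0 + zchar_weight (tl.getD i ' ')))) i

def wagner_optimal_parse (text : String) (abblist : List String) : Int :=
  let tl := text.toList
  let abbl := abblist.map String.toList
  let N := tl.length
  -- f = [0 for i in range(0, N+1)]; f[N] = 0
  let f := (List.replicate (N+1) (0:Int)).set N 0
  (pvLoopA tl abbl f N).getD 0 0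

-- ===== PORT B =====
-- stage 1, inner 'for i in range(0, N - L + 1)': append i to starts[i+L] on a match
def pvStarts1 (tl : List Char) (ab : List Char) (st : List (List Nat)) : List (List Nat) :=
  (List.range (tl.length + 1 - ab.length)).foldl (fun st (i : Nat) =>
    if PySem.List.slice tl (some (i : Int)) (some ((i + ab.length : Nat) : Int)) = ab then
      st.set (i + ab.length) (st.getD (i + ab.length) [] ++ [i])
    else st) st

-- stage 1, 'for ab in abblist'
def pvStarts (tl : List Char) (abbl : List (List Char)) : List (List Nat) :=
  abbl.foldl (fun st ab => pvStarts1 tl ab st) (List.replicate (tl.length + 1) [])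

-- stage 2, inner 'for i in starts[j]: best = min(best, g[i] + 2)'
def pvInnerB (g : List Int) (lst : List Nat) (best : Int) : Int :=
  lst.foldl (fun best i => min best (g.getD i 0 + 2)) best

-- stage 2, 'for j in range(1, N + 1)': pvLoopB g j fuel processes j, j+1, …, j+fuel-1
def pvLoopB (tl : List Char) (starts : List (List Nat)) : List Int → Nat → Nat → List Int
  | g, _, 0 => g
  | g, j, (k+1) =>
    pvLoopB tl starts
      (g.set j (pvInnerB g (starts.getD j []) (g.getD (j-1) 0 + zchar_weight (tl.getD (j-1) ' ')))) (j+1) k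

def wagner_optimal_parse_alt (text : String) (abblist : List String) : Int :=
  let tl := text.toList
  let abbl := abblist.map String.toList
  let N := tl.length
  let starts := pvStarts tl abbl
  let g := List.replicate (N+1) (0:Int)
  (pvLoopB tl starts g 1 N).getD N 0

-- ===== PRECONDITION & SPEC =====
def Spec_wagner_optimal_parse (text : String) (abblist : List String) (out : Int) : Prop := out = wagner_optimal_parse_alt text abblist
instance (text : String) (abblist : List String) (out : Int) : Decidable (Spec_wagner_optimal_parse text abblist out) := by unfold Spec_wagner_optimal_parse; infer_instance

-- ===== CLAIM (what is proved, stated in full; the proofs are below) =====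
def Claim_equal_wagner_optimal_parse : Prop := ∀ (text : String) (abblist : List String), Dom_wagner_optimal_parse text abblist → Spec_wagner_optimal_parse text abblist (wagner_optimal_parse text abblist)

-- ===== LEMMAS AND PROOFS =====

-- generic list-array helpers
theorem pv_getD_set_ne {a : Type} (l : List a) (i m : Nat) (x : a) (d : a) (h : i ≠ m) :
    (l.set i x).getD m d = l.getD m d := by
  simp [List.getD_eq_getElem?_getD, h]

theorem pv_getD_set_self {a : Type} (l : List a) (i : Nat) (x : a) (d : a) (h : i < l.length) :
    (l.set i x).getD i d = x := by
  simp [List.getD_eq_getElem?_getD, h]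

theorem pv_getD_replicate {a : Type} (n m : Nat) (x : a) (d : a) :
    (List.replicate n x).getD m d = if m < n then x else d := by
  by_cases h : m < n
  · simp [List.getD_eq_getElem?_getD, h]
  · simp [List.getD_eq_getElem?_getD, h]

theorem pv_getD_out {a : Type} (l : List a) (m : Nat) (d : a) (h : l.length ≤ m) :
    l.getD m d = d := by
  simp [List.getD_eq_getElem?_getD, List.getElem?_eq_none_iff.mpr h]

theorem pv_foldl_ext {a b : Type} (f g : b → a → b) (h : ∀ x y, f x y = g x y)
    (l : List a) (i : b) : l.foldl f i = l.foldl g i := by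
  have : f = g := funext fun x => funext (h x)
  rw [this]

theorem pvReplicate_set (n : Nat) :
    (List.replicate (n+1) (0:Int)).set n 0 = List.replicate (n+1) (0:Int) := by
  apply List.ext_getElem
  · simp
  · intro i h1 h2; simp

-- r is the minimum of the start value s and the candidate list l
def pvIsMin (s : Int) (l : List Int) (r : Int) : Prop :=
  r ≤ s ∧ (∀ x ∈ l, r ≤ x) ∧ (r = s ∨ r ∈ l)

-- A-shaped fold ('if v x < acc then v x else acc' under a test) computes the minimum
theorem pvFoldA_isMin {a : Type} (p : a → Prop) [DecidablePred p] (v : a → Int) :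
    ∀ (l : List a) (s : Int),
      pvIsMin s ((l.filter (fun x => decide (p x))).map v)
        (l.foldl (fun acc x => if p x then (if v x < acc then v x else acc) else acc) s) := by
  intro l
  induction l with
  | nil => intro s; exact ⟨le_refl s, by simp, Or.inl rfl⟩
  | cons x l ih =>
    intro s
    simp only [List.foldl_cons]
    by_cases hp : p x
    · simp only [if_pos hp, List.filter_cons, decide_eq_true hp, if_pos, List.map_cons]
      by_cases hv : v x < s
      · simp only [if_pos hv]
        obtain ⟨c1, c2, c3⟩ := ih (v x)
        refine ⟨by omega, ?_, ?_⟩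
        · intro y hy
          rcases List.mem_cons.mp hy with h | h
          · omega
          · exact c2 _ h
        · rcases c3 with h | h
          · exact Or.inr (List.mem_cons.mpr (Or.inl h))
          · exact Or.inr (List.mem_cons.mpr (Or.inr h))
      · simp only [if_neg hv]
        obtain ⟨c1, c2, c3⟩ := ih s
        refine ⟨c1, ?_, ?_⟩
        · intro y hy
          rcases List.mem_cons.mp hy with h | h
          · omega
          · exact c2 _ h
        · rcases c3 with h | h
          · exact Or.inl h
          · exact Or.inr (List.mem_cons.mpr (Or.inr h))
    · rw [if_neg hp, List.filter_cons_of_neg (by simpa using hp)]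
      exact ih s

-- B-shaped fold ('min acc (v x)') computes the minimum
theorem pvFoldMin_isMin {a : Type} (v : a → Int) :
    ∀ (l : List a) (s : Int),
      pvIsMin s (l.map v) (l.foldl (fun acc x => min acc (v x)) s) := by
  intro l
  induction l with
  | nil => intro s; exact ⟨le_refl s, by simp, Or.inl rfl⟩
  | cons x l ih =>
    intro s
    simp only [List.foldl_cons, List.map_cons]
    obtain ⟨c1, c2, c3⟩ := ih (min s (v x))
    refine ⟨le_trans c1 (min_le_left _ _), ?_, ?_⟩
    · intro y hy
      rcases List.mem_cons.mp hy with h | h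
      · subst h; exact le_trans c1 (min_le_right _ _)
      · exact c2 _ h
    · rcases c3 with h | h
      · rcases Int.lt_or_le (v x) s with hlt | hle
        · exact Or.inr (List.mem_cons.mpr (Or.inl (by rw [h]; exact min_eq_right (le_of_lt hlt))))
        · exact Or.inl (by rw [h]; exact min_eq_left hle)
      · exact Or.inr (List.mem_cons.mpr (Or.inr h))

-- character weight at position i
def pvW (tl : List Char) (i : Nat) : Int := zchar_weight (tl.getD i ' ')

theorem pvW_pos (tl : List Char) (i : Nat) : 1 ≤ pvW tl i := by
  unfold pvW zchar_weight
  split_ifs <;> norm_num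

-- A's per-position candidate minimum, expressed against an arbitrary array r
-- (the 'if ab.length = 0 then 0' reflects A reading the not-yet-written cell f[I])
def pvCandA (tl : List Char) (abbl : List (List Char)) (r : List Int) (i : Nat) : Int :=
  abbl.foldl (fun val ab =>
    if i + ab.length ≤ tl.length ∧
       PySem.List.slice tl (some (i : Int)) (some ((i + ab.length : Nat) : Int)) = ab then
      (if (if ab.length = 0 then (0:Int) else r.getD (i + ab.length) 0) + 2 < val then
         (if ab.length = 0 then (0:Int) else r.getD (i + ab.length) 0) + 2
       else val)
    else val) (r.getD (i+1) 0 + pvW tl i)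

-- B's per-position candidate minimum against an arbitrary array r
def pvCandB (tl : List Char) (starts : List (List Nat)) (r : List Int) (j : Nat) : Int :=
  (starts.getD j []).foldl (fun best i => min best ((if i = j then (0:Int) else r.getD i 0) + 2))
    (r.getD (j-1) 0 + pvW tl (j-1))

-- the loop of A: positions ≥ k keep their value, positions < k satisfy the recurrence
theorem pvMainA (tl : List Char) (abbl : List (List Char)) :
    ∀ (k : Nat) (f : List Int), f.length = tl.length + 1 → k ≤ tl.length →
      (∀ m, m < k → f.getD m 0 = 0) →
      (pvLoopA tl abbl f k).length = tl.length + 1 ∧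
      (∀ m, k ≤ m → (pvLoopA tl abbl f k).getD m 0 = f.getD m 0) ∧
      (∀ i, i < k → (pvLoopA tl abbl f k).getD i 0 = pvCandA tl abbl (pvLoopA tl abbl f k) i) := by
  intro k
  induction k with
  | zero =>
    intro f hlen _ _
    exact ⟨hlen, fun m _ => rfl, fun i hi => absurd hi (by omega)⟩
  | succ k ih =>
    intro f hlen hk hz
    have hkN : k < tl.length := by omega
    set f' := f.set k (pvInnerA tl f k abbl (f.getD (k+1) 0 + zchar_weight (tl.getD k ' '))) with hf'
    have hstep : pvLoopA tl abbl f (k+1) = pvLoopA tl abbl f' k := rfl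
    have hlen' : f'.length = tl.length + 1 := by rw [hf', List.length_set, hlen]
    have hz' : ∀ m, m < k → f'.getD m 0 = 0 := by
      intro m hm
      rw [hf', pv_getD_set_ne _ _ _ _ _ (by omega)]
      exact hz m (by omega)
    obtain ⟨ha, hb, hc⟩ := ih f' hlen' (by omega) hz'
    rw [hstep]
    refine ⟨ha, ?_, ?_⟩
    · intro m hm
      rw [hb m (by omega), hf', pv_getD_set_ne _ _ _ _ _ (by omega)]
    · intro i hi
      rcases Nat.lt_or_ge i k with h | h
      · exact hc i h
      · have hik : i = k := by omega
        subst hik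
        rw [hb i (le_refl i), hf', pv_getD_set_self _ _ _ _ (by omega)]
        -- now show the step value equals pvCandA over the final array
        have hR2 : ∀ m, i ≤ m → (pvLoopA tl abbl f' i).getD m 0 = f'.getD m 0 := hb
        generalize (pvLoopA tl abbl f' i) = R at hR2 ⊢
        have hbase : f.getD (i+1) 0 = R.getD (i+1) 0 := by
          rw [hR2 (i+1) (by omega), hf', pv_getD_set_ne _ _ _ _ _ (by omega)]
        unfold pvInnerA pvCandA pvW
        rw [hbase]
        apply pv_foldl_ext
        intro val ab
        have hlook : f.getD (i + ab.length) 0 =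
            (if ab.length = 0 then (0:Int) else R.getD (i + ab.length) 0) := by
          by_cases h0 : ab.length = 0
          · simp only [h0, if_pos, Nat.add_zero]
            exact hz i (by omega)
          · rw [if_neg h0, hR2 (i + ab.length) (by omega), hf',
              pv_getD_set_ne _ _ _ _ _ (by omega)]
        rw [hlook]

-- the loop of B: positions < j keep their value, processed positions satisfy the recurrence
theorem pvMainB (tl : List Char) (starts : List (List Nat))
    (hst : ∀ j i, i ∈ starts.getD j [] → i ≤ j) :
    ∀ (fuel j : Nat) (g : List Int), g.length = tl.length + 1 → 1 ≤ j →
      j + fuel = tl.length + 1 → (∀ m, j ≤ m → g.getD m 0 = 0) →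
      (pvLoopB tl starts g j fuel).length = tl.length + 1 ∧
      (∀ m, m < j → (pvLoopB tl starts g j fuel).getD m 0 = g.getD m 0) ∧
      (∀ jj, j ≤ jj → jj ≤ tl.length →
        (pvLoopB tl starts g j fuel).getD jj 0 = pvCandB tl starts (pvLoopB tl starts g j fuel) jj) := by
  intro fuel
  induction fuel with
  | zero =>
    intro j g hlen hj1 hjf _
    exact ⟨hlen, fun m _ => rfl, fun jj h1 h2 => absurd h2 (by omega)⟩
  | succ fuel ih =>
    intro j g hlen hj1 hjf hz
    have hjN : j ≤ tl.length := by omega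
    set g' := g.set j (pvInnerB g (starts.getD j []) (g.getD (j-1) 0 + zchar_weight (tl.getD (j-1) ' '))) with hg'
    have hstep : pvLoopB tl starts g j (fuel+1) = pvLoopB tl starts g' (j+1) fuel := rfl
    have hlen' : g'.length = tl.length + 1 := by rw [hg', List.length_set, hlen]
    have hz' : ∀ m, j + 1 ≤ m → g'.getD m 0 = 0 := by
      intro m hm
      rw [hg', pv_getD_set_ne _ _ _ _ _ (by omega)]
      exact hz m (by omega)
    obtain ⟨ha, hb, hc⟩ := ih (j+1) g' hlen' (by omega) (by omega) hz'
    rw [hstep]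
    refine ⟨ha, ?_, ?_⟩
    · intro m hm
      rw [hb m (by omega), hg', pv_getD_set_ne _ _ _ _ _ (by omega)]
    · intro jj h1 h2
      rcases Nat.lt_or_ge j jj with h | h
      · exact hc jj (by omega) h2
      · have hjj : jj = j := by omega
        subst hjj
        rw [hb jj (by omega), hg', pv_getD_set_self _ _ _ _ (by omega)]
        have hR2 : ∀ m, m < jj + 1 → (pvLoopB tl starts g' (jj+1) fuel).getD m 0 = g'.getD m 0 := hb
        generalize (pvLoopB tl starts g' (jj+1) fuel) = R at hR2 ⊢
        have hbase : g.getD (jj-1) 0 = R.getD (jj-1) 0 := by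
          rw [hR2 (jj-1) (by omega), hg', pv_getD_set_ne _ _ _ _ _ (by omega)]
        unfold pvInnerB pvCandB pvW
        rw [hbase]
        apply PySem.List.foldl_congr_mem
        intro best i hi
        have hij : i ≤ jj := hst jj i hi
        by_cases hieq : i = jj
        · rw [if_pos hieq, hieq, hz jj (le_refl jj)]
        · rw [if_neg hieq, hR2 i (by omega), hg', pv_getD_set_ne _ _ _ _ _ (by omega)]

-- stage-1 characterisation: the inner fold over candidate start positions
theorem pvS1aux (tl : List Char) (ab : List Char) :
    ∀ (l : List Nat) (st : List (List Nat)), (∀ x ∈ l, x + ab.length < st.length) →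
      (l.foldl (fun st (i : Nat) =>
          if PySem.List.slice tl (some (i : Int)) (some ((i + ab.length : Nat) : Int)) = ab then
            st.set (i + ab.length) (st.getD (i + ab.length) [] ++ [i])
          else st) st).length = st.length ∧
      (∀ j i, i ∈ (l.foldl (fun st (i : Nat) =>
          if PySem.List.slice tl (some (i : Int)) (some ((i + ab.length : Nat) : Int)) = ab then
            st.set (i + ab.length) (st.getD (i + ab.length) [] ++ [i])
          else st) st).getD j [] ↔
        i ∈ st.getD j [] ∨ (i ∈ l ∧
          PySem.List.slice tl (some (i : Int)) (some ((i + ab.length : Nat) : Int)) = ab ∧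
          i + ab.length = j)) := by
  intro l
  induction l with
  | nil =>
    intro st _
    exact ⟨rfl, fun j i => by simp⟩
  | cons x l ih =>
    intro st hx
    simp only [List.foldl_cons]
    by_cases hm : PySem.List.slice tl (some (x : Int)) (some ((x + ab.length : Nat) : Int)) = ab
    · rw [if_pos hm]
      set st' := st.set (x + ab.length) (st.getD (x + ab.length) [] ++ [x]) with hst'
      have hlen' : st'.length = st.length := by rw [hst', List.length_set]
      obtain ⟨ha, hb⟩ := ih st' (by intro y hy; rw [hlen']; exact hx y (List.mem_cons.mpr (Or.inr hy)))
      refine ⟨by rw [ha, hlen'], ?_⟩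
      intro j i
      rw [hb j i]
      have hmem : ∀ (i : Nat), i ∈ st'.getD j [] ↔
          i ∈ st.getD j [] ∨ (i = x ∧ x + ab.length = j) := by
        intro i
        by_cases hj : x + ab.length = j
        · subst hj
          rw [hst', pv_getD_set_self _ _ _ _ (hx x (List.mem_cons.mpr (Or.inl rfl)))]
          simp
        · rw [hst', pv_getD_set_ne _ _ _ _ _ hj]
          simp [hj]
      rw [hmem i]
      constructor
      · rintro ((h | ⟨h1, h2⟩) | ⟨h1, h2, h3⟩)
        · exact Or.inl h
        · subst h1; exact Or.inr ⟨List.mem_cons.mpr (Or.inl rfl), hm, h2⟩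
        · exact Or.inr ⟨List.mem_cons.mpr (Or.inr h1), h2, h3⟩
      · rintro (h | ⟨h1, h2, h3⟩)
        · exact Or.inl (Or.inl h)
        · rcases List.mem_cons.mp h1 with h4 | h4
          · subst h4; exact Or.inl (Or.inr ⟨rfl, h3⟩)
          · exact Or.inr ⟨h4, h2, h3⟩
    · rw [if_neg hm]
      obtain ⟨ha, hb⟩ := ih st (by intro y hy; exact hx y (List.mem_cons.mpr (Or.inr hy)))
      refine ⟨ha, ?_⟩
      intro j i
      rw [hb j i]
      constructor
      · rintro (h | ⟨h1, h2, h3⟩)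
        · exact Or.inl h
        · exact Or.inr ⟨List.mem_cons.mpr (Or.inr h1), h2, h3⟩
      · rintro (h | ⟨h1, h2, h3⟩)
        · exact Or.inl h
        · rcases List.mem_cons.mp h1 with h4 | h4
          · subst h4; exact absurd h2 hm
          · exact Or.inr ⟨h4, h2, h3⟩

-- 'some abbreviation equals text[i:j]' (j ≤ N forced by the loop bound)
def pvM (tl : List Char) (abbl : List (List Char)) (i j : Nat) : Prop :=
  ∃ ab ∈ abbl, i + ab.length = j ∧ i + ab.length ≤ tl.length ∧
    PySem.List.slice tl (some (i : Int)) (some ((i + ab.length : Nat) : Int)) = ab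

theorem pvStarts1_spec (tl : List Char) (ab : List Char) (st : List (List Nat))
    (hlen : st.length = tl.length + 1) :
    (pvStarts1 tl ab st).length = tl.length + 1 ∧
    (∀ j i, i ∈ (pvStarts1 tl ab st).getD j [] ↔
      i ∈ st.getD j [] ∨ (i + ab.length ≤ tl.length ∧
        PySem.List.slice tl (some (i : Int)) (some ((i + ab.length : Nat) : Int)) = ab ∧
        i + ab.length = j)) := by
  unfold pvStarts1
  obtain ⟨ha, hb⟩ := pvS1aux tl ab (List.range (tl.length + 1 - ab.length)) st
    (by intro x hx; rw [hlen]; have := List.mem_range.mp hx; omega)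
  refine ⟨by rw [ha, hlen], ?_⟩
  intro j i
  rw [hb j i]
  have : i ∈ List.range (tl.length + 1 - ab.length) ↔ i + ab.length ≤ tl.length := by
    rw [List.mem_range]; omega
  tauto

theorem pvStarts_spec (tl : List Char) (abbl : List (List Char)) :
    (pvStarts tl abbl).length = tl.length + 1 ∧
    (∀ j i, i ∈ (pvStarts tl abbl).getD j [] ↔ pvM tl abbl i j) := by
  unfold pvStarts
  have main : ∀ (l : List (List Char)) (st : List (List Nat)), st.length = tl.length + 1 →
      (l.foldl (fun st ab => pvStarts1 tl ab st) st).length = tl.length + 1 ∧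
      (∀ j i, i ∈ (l.foldl (fun st ab => pvStarts1 tl ab st) st).getD j [] ↔
        i ∈ st.getD j [] ∨ ∃ ab ∈ l, i + ab.length = j ∧ i + ab.length ≤ tl.length ∧
          PySem.List.slice tl (some (i : Int)) (some ((i + ab.length : Nat) : Int)) = ab) := by
    intro l
    induction l with
    | nil => intro st h; exact ⟨h, fun j i => by simp⟩
    | cons ab l ih =>
      intro st h
      simp only [List.foldl_cons]
      obtain ⟨h1, h2⟩ := pvStarts1_spec tl ab st h
      obtain ⟨h3, h4⟩ := ih (pvStarts1 tl ab st) h1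
      refine ⟨h3, ?_⟩
      intro j i
      rw [h4 j i, h2 j i]
      constructor
      · rintro ((h | ⟨ha', hb', hc'⟩) | ⟨x, hx, h5, h6, h7⟩)
        · exact Or.inl h
        · exact Or.inr ⟨ab, List.mem_cons.mpr (Or.inl rfl), hc', ha', hb'⟩
        · exact Or.inr ⟨x, List.mem_cons.mpr (Or.inr hx), h5, h6, h7⟩
      · rintro (h | ⟨x, hx, h5, h6, h7⟩)
        · exact Or.inl (Or.inl h)
        · rcases List.mem_cons.mp hx with h8 | h8
          · subst h8; exact Or.inl (Or.inr ⟨h6, h7, h5⟩)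
          · exact Or.inr ⟨x, h8, h5, h6, h7⟩
  obtain ⟨h1, h2⟩ := main abbl (List.replicate (tl.length + 1) []) (by simp)
  refine ⟨h1, ?_⟩
  intro j i
  rw [h2 j i]
  unfold pvM
  have : i ∈ (List.replicate (tl.length + 1) ([] : List Nat)).getD j [] ↔ False := by
    rw [pv_getD_replicate]
    split_ifs <;> simp
  tauto

-- the final arrays and their values
def pvF (tl : List Char) (abbl : List (List Char)) : List Int :=
  pvLoopA tl abbl (List.replicate (tl.length + 1) (0:Int)) tl.length

def pvFv (tl : List Char) (abbl : List (List Char)) (i : Nat) : Int := (pvF tl abbl).getD i 0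

def pvG (tl : List Char) (abbl : List (List Char)) : List Int :=
  pvLoopB tl (pvStarts tl abbl) (List.replicate (tl.length + 1) (0:Int)) 1 tl.length

def pvGv (tl : List Char) (abbl : List (List Char)) (j : Nat) : Int := (pvG tl abbl).getD j 0

theorem pvFv_hi (tl : List Char) (abbl : List (List Char)) (i : Nat) (h : tl.length ≤ i) :
    pvFv tl abbl i = 0 := by
  unfold pvFv pvF
  obtain ⟨_, hb, _⟩ := pvMainA tl abbl tl.length (List.replicate (tl.length + 1) (0:Int))
    (by simp) (le_refl _) (fun m _ => by rw [pv_getD_replicate]; split_ifs <;> rfl)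
  rw [hb i h, pv_getD_replicate]
  split_ifs <;> rfl

theorem pvFv_rec (tl : List Char) (abbl : List (List Char)) (i : Nat) (h : i < tl.length) :
    pvFv tl abbl i = pvCandA tl abbl (pvF tl abbl) i := by
  unfold pvFv pvF
  obtain ⟨_, _, hc⟩ := pvMainA tl abbl tl.length (List.replicate (tl.length + 1) (0:Int))
    (by simp) (le_refl _) (fun m _ => by rw [pv_getD_replicate]; split_ifs <;> rfl)
  exact hc i h

theorem pvStarts_le (tl : List Char) (abbl : List (List Char)) :
    ∀ j i, i ∈ (pvStarts tl abbl).getD j [] → i ≤ j := by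
  intro j i h
  obtain ⟨ab, _, h1, _, _⟩ := ((pvStarts_spec tl abbl).2 j i).mp h
  omega

theorem pvGv_lo (tl : List Char) (abbl : List (List Char)) : pvGv tl abbl 0 = 0 := by
  unfold pvGv pvG
  obtain ⟨_, hb, _⟩ := pvMainB tl (pvStarts tl abbl) (pvStarts_le tl abbl) tl.length 1
    (List.replicate (tl.length + 1) (0:Int)) (by simp) (le_refl _) (by omega)
    (fun m _ => by rw [pv_getD_replicate]; split_ifs <;> rfl)
  rw [hb 0 (by omega), pv_getD_replicate]
  split_ifs <;> rfl

theorem pvGv_rec (tl : List Char) (abbl : List (List Char)) (j : Nat) (h1 : 1 ≤ j)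
    (h2 : j ≤ tl.length) :
    pvGv tl abbl j = pvCandB tl (pvStarts tl abbl) (pvG tl abbl) j := by
  unfold pvGv pvG
  obtain ⟨_, _, hc⟩ := pvMainB tl (pvStarts tl abbl) (pvStarts_le tl abbl) tl.length 1
    (List.replicate (tl.length + 1) (0:Int)) (by simp) (le_refl _) (by omega)
    (fun m _ => by rw [pv_getD_replicate]; split_ifs <;> rfl)
  exact hc j h1 h2

-- usable forms of the two recurrences
theorem pvFv_le_start (tl : List Char) (abbl : List (List Char)) (i : Nat) (h : i < tl.length) :
    pvFv tl abbl i ≤ pvFv tl abbl (i+1) + pvW tl i := by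
  rw [pvFv_rec tl abbl i h]
  exact (pvFoldA_isMin _ _ abbl _).1

theorem pvFv_le_cand (tl : List Char) (abbl : List (List Char)) (i : Nat) (h : i < tl.length)
    (ab : List Char) (hab : ab ∈ abbl) (hle : i + ab.length ≤ tl.length)
    (hsl : PySem.List.slice tl (some (i : Int)) (some ((i + ab.length : Nat) : Int)) = ab) :
    pvFv tl abbl i ≤ (if ab.length = 0 then (0:Int) else pvFv tl abbl (i + ab.length)) + 2 := by
  rw [pvFv_rec tl abbl i h]
  refine (pvFoldA_isMin _ _ abbl _).2.1 _ ?_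
  exact List.mem_map.mpr ⟨ab, List.mem_filter.mpr ⟨hab, decide_eq_true ⟨hle, hsl⟩⟩, rfl⟩

theorem pvFv_cases (tl : List Char) (abbl : List (List Char)) (i : Nat) (h : i < tl.length) :
    pvFv tl abbl i = pvFv tl abbl (i+1) + pvW tl i ∨
    ∃ ab ∈ abbl, i + ab.length ≤ tl.length ∧
      PySem.List.slice tl (some (i : Int)) (some ((i + ab.length : Nat) : Int)) = ab ∧
      pvFv tl abbl i = (if ab.length = 0 then (0:Int) else pvFv tl abbl (i + ab.length)) + 2 := by
  rw [pvFv_rec tl abbl i h]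
  rcases (pvFoldA_isMin
      (fun ab : List Char => i + ab.length ≤ tl.length ∧
        PySem.List.slice tl (some (i : Int)) (some ((i + ab.length : Nat) : Int)) = ab)
      (fun ab : List Char =>
        (if ab.length = 0 then (0:Int) else (pvF tl abbl).getD (i + ab.length) 0) + 2)
      abbl _).2.2 with h1 | h1
  · exact Or.inl h1
  · obtain ⟨ab, hab, hv⟩ := List.mem_map.mp h1
    obtain ⟨hmem, hcond⟩ := List.mem_filter.mp hab
    simp only [decide_eq_true_eq] at hcond
    exact Or.inr ⟨ab, hmem, hcond.1, hcond.2, hv.symm⟩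

theorem pvGv_le_start (tl : List Char) (abbl : List (List Char)) (j : Nat) (h1 : 1 ≤ j)
    (h2 : j ≤ tl.length) :
    pvGv tl abbl j ≤ pvGv tl abbl (j-1) + pvW tl (j-1) := by
  rw [pvGv_rec tl abbl j h1 h2]
  exact (pvFoldMin_isMin _ _ _).1

theorem pvGv_le_cand (tl : List Char) (abbl : List (List Char)) (j i : Nat) (h1 : 1 ≤ j)
    (h2 : j ≤ tl.length) (hM : pvM tl abbl i j) :
    pvGv tl abbl j ≤ (if i = j then (0:Int) else pvGv tl abbl i) + 2 := by
  rw [pvGv_rec tl abbl j h1 h2]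
  refine (pvFoldMin_isMin _ _ _).2.1 _ ?_
  exact List.mem_map.mpr ⟨i, ((pvStarts_spec tl abbl).2 j i).mpr hM, rfl⟩

theorem pvGv_cases (tl : List Char) (abbl : List (List Char)) (j : Nat) (h1 : 1 ≤ j)
    (h2 : j ≤ tl.length) :
    pvGv tl abbl j = pvGv tl abbl (j-1) + pvW tl (j-1) ∨
    ∃ i, pvM tl abbl i j ∧ pvGv tl abbl j = (if i = j then (0:Int) else pvGv tl abbl i) + 2 := by
  rw [pvGv_rec tl abbl j h1 h2]
  rcases (pvFoldMin_isMin _ _ _).2.2 with h | h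
  · exact Or.inl h
  · obtain ⟨i, hi, hv⟩ := List.mem_map.mp h
    exact Or.inr ⟨i, ((pvStarts_spec tl abbl).2 j i).mp hi, hv.symm⟩

-- the empty abbreviation matches everywhere
theorem pvM_self (tl : List Char) (abbl : List (List Char)) (j : Nat) (h : j ≤ tl.length) :
    pvM tl abbl j j ↔ [] ∈ abbl := by
  constructor
  · rintro ⟨ab, hab, h1, _, _⟩
    have : ab.length = 0 := by omega
    rwa [List.length_eq_zero_iff.mp this] at hab
  · intro hab
    refine ⟨[], hab, by simp, by simpa using h, ?_⟩
    simp [PySem.List.slice_natCast]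

-- nonnegativity
theorem pvFv_nonneg (tl : List Char) (abbl : List (List Char)) :
    ∀ (d : Nat) (i : Nat), tl.length - i ≤ d → 0 ≤ pvFv tl abbl i := by
  intro d
  induction d with
  | zero => intro i h; rw [pvFv_hi tl abbl i (by omega)]
  | succ d ih =>
    intro i h
    rcases Nat.lt_or_ge i tl.length with hi | hi
    · rcases pvFv_cases tl abbl i hi with h1 | ⟨ab, _, hle, _, h1⟩
      · have := ih (i+1) (by omega)
        have := pvW_pos tl i
        omega
      · by_cases h0 : ab.length = 0
        · rw [h1, if_pos h0]; omega
        · have := ih (i + ab.length) (by omega)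
          rw [h1, if_neg h0]
          omega
    · rw [pvFv_hi tl abbl i hi]

theorem pvGv_nonneg (tl : List Char) (abbl : List (List Char)) :
    ∀ (j : Nat), 0 ≤ pvGv tl abbl j := by
  intro j
  induction j using Nat.strong_induction_on with
  | _ j ih =>
    rcases Nat.eq_zero_or_pos j with h0 | h0
    · rw [h0, pvGv_lo]
    · rcases Nat.lt_or_ge tl.length j with hj2 | hj2
      · -- out of range: the array has length N+1
        unfold pvGv pvG
        obtain ⟨ha, _, _⟩ := pvMainB tl (pvStarts tl abbl) (pvStarts_le tl abbl) tl.length 1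
          (List.replicate (tl.length + 1) (0:Int)) (by simp) (le_refl _) (by omega)
          (fun m _ => by rw [pv_getD_replicate]; split_ifs <;> rfl)
        rw [pv_getD_out _ _ _ (by omega)]
      · rcases pvGv_cases tl abbl j h0 hj2 with h1 | ⟨i, hM, h1⟩
        · have := ih (j-1) (by omega)
          have := pvW_pos tl (j-1)
          omega
        · by_cases hieq : i = j
          · rw [h1, if_pos hieq]; omega
          · have hij : i ≤ j := by obtain ⟨ab, _, h2, _, _⟩ := hM; omega
            have := ih i (by omega)
            rw [h1, if_neg hieq]
            omega

-- with the empty abbreviation present, every value is capped at 2 (the stale-cell read)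
theorem pvFv_le_two (tl : List Char) (abbl : List (List Char)) (hab : [] ∈ abbl) (i : Nat)
    (h : i ≤ tl.length) : pvFv tl abbl i ≤ 2 := by
  rcases Nat.lt_or_ge i tl.length with hi | hi
  · have := pvFv_le_cand tl abbl i hi [] hab (by simpa using h) (by simp [PySem.List.slice_natCast])
    simpa using this
  · rw [pvFv_hi tl abbl i hi]; omega

theorem pvGv_le_two (tl : List Char) (abbl : List (List Char)) (hab : [] ∈ abbl) (j : Nat)
    (h1 : 1 ≤ j) (h2 : j ≤ tl.length) : pvGv tl abbl j ≤ 2 := by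
  have := pvGv_le_cand tl abbl j j h1 h2 ((pvM_self tl abbl j h2).mpr hab)
  simpa using this

-- forward/backward duality, ≤ direction: f(0) ≤ g(j) + f(j)
theorem pv_up (tl : List Char) (abbl : List (List Char)) :
    ∀ (j : Nat), j ≤ tl.length → pvFv tl abbl 0 ≤ pvGv tl abbl j + pvFv tl abbl j := by
  intro j
  induction j using Nat.strong_induction_on with
  | _ j ih =>
    intro hj
    rcases Nat.eq_zero_or_pos j with h0 | h0
    · subst h0
      rw [pvGv_lo]
      omega
    · rcases pvGv_cases tl abbl j h0 hj with h1 | ⟨i, hM, h1⟩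
      · -- g(j) = g(j-1) + w(j-1)
        have hstep : pvFv tl abbl (j-1) ≤ pvFv tl abbl j + pvW tl (j-1) := by
          have := pvFv_le_start tl abbl (j-1) (by omega)
          have hjj : j - 1 + 1 = j := by omega
          rwa [hjj] at this
        have := ih (j-1) (by omega) (by omega)
        omega
      · by_cases hieq : i = j
        · -- self match: the empty abbreviation is present
          rw [hieq] at hM
          have hab : [] ∈ abbl := (pvM_self tl abbl j hj).mp hM
          have h2 := pvFv_le_two tl abbl hab 0 (by omega)
          have h3 := pvFv_nonneg tl abbl tl.length j (by omega)
          rw [h1, if_pos hieq]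
          omega
        · obtain ⟨ab, hab, hlen, hle, hsl⟩ := hM
          have hij : i < j := by omega
          have h2 : pvFv tl abbl i ≤ pvFv tl abbl j + 2 := by
            have := pvFv_le_cand tl abbl i (by omega) ab hab hle hsl
            have h0' : ab.length ≠ 0 := by omega
            rw [if_neg h0', hlen] at this
            exact this
          have := ih i hij (by omega)
          rw [h1, if_neg hieq]
          omega

-- forward/backward duality, ≥ direction: g(N) ≤ g(i) + f(i)
theorem pv_down (tl : List Char) (abbl : List (List Char)) :
    ∀ (d : Nat) (i : Nat), i ≤ tl.length → tl.length - i ≤ d →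
      pvGv tl abbl tl.length ≤ pvGv tl abbl i + pvFv tl abbl i := by
  intro d
  induction d with
  | zero =>
    intro i h1 h2
    have : i = tl.length := by omega
    subst this
    rw [pvFv_hi tl abbl tl.length (le_refl _)]
    omega
  | succ d ih =>
    intro i h1 h2
    rcases Nat.lt_or_ge i tl.length with hi | hi
    · rcases pvFv_cases tl abbl i hi with h3 | ⟨ab, hab, hle, hsl, h3⟩
      · -- f(i) = f(i+1) + w(i)
        have hstep : pvGv tl abbl (i+1) ≤ pvGv tl abbl i + pvW tl i := by
          have := pvGv_le_start tl abbl (i+1) (by omega) (by omega)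
          simpa using this
        have := ih (i+1) (by omega) (by omega)
        omega
      · by_cases h0 : ab.length = 0
        · -- empty abbreviation: both sides capped at 2
          have hab' : [] ∈ abbl := by rwa [List.length_eq_zero_iff.mp h0] at hab
          have h4 := pvGv_le_two tl abbl hab' tl.length (by omega) (le_refl _)
          have h5 := pvGv_nonneg tl abbl i
          rw [h3, if_pos h0]
          omega
        · have hM : pvM tl abbl i (i + ab.length) := ⟨ab, hab, rfl, hle, hsl⟩
          have h4 : pvGv tl abbl (i + ab.length) ≤ pvGv tl abbl i + 2 := by
            have := pvGv_le_cand tl abbl (i + ab.length) i (by omega) hle hM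
            rwa [if_neg (by omega)] at this
          have := ih (i + ab.length) hle (by omega)
          rw [h3, if_neg h0]
          omega
    · have : i = tl.length := by omega
      subst this
      rw [pvFv_hi tl abbl tl.length (le_refl _)]
      omega

theorem pvFG (tl : List Char) (abbl : List (List Char)) :
    pvFv tl abbl 0 = pvGv tl abbl tl.length := by
  apply le_antisymm
  · have := pv_up tl abbl tl.length (le_refl _)
    rw [pvFv_hi tl abbl tl.length (le_refl _)] at this
    omega
  · have := pv_down tl abbl tl.length 0 (by omega) (by omega)
    rw [pvGv_lo] at this
    omega

-- ===== VERDICT (by name: the statement is the Claim_ definition above) =====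
theorem wagner_optimal_parse_spec : Claim_equal_wagner_optimal_parse := by
  intro text abblist _
  unfold Spec_wagner_optimal_parse wagner_optimal_parse wagner_optimal_parse_alt
  simp only [pvReplicate_set]
  exact pvFG text.toList (abblist.map String.toList)
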